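-- pv_equiv track=rewrite | github.com/mateuszwardak/challenges | benfords/core.py | get_number_from_line
-- ===== SOURCE A (Python) =====
-- def get_number_from_line(line, i=0):
--     line_columns = line.split()
--
--     try:
--         relevant_number = int(line_columns[i])
--         return relevant_number
--     except ValueError:
--         # if proper number is not found in a column, check next column recursively
--         return get_number_from_line(line, i + 1)
--     except IndexError:
--         # no number found in a line probably means end of file or irrelevant spacing line - ignore it
--         return
-- ===== SOURCE B (Python) =====
-- def get_number_from_line(line, i=0):
--     for col in line.split()[i:]:
--         try:
--             return int(col)
--         except ValueError:
--             pass
--     return None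
-- ===== Notes on version B (the rewrite author's own statement) =====
-- stated objective: simpler
-- what changed: Replaces A's recursion (which re-splits the whole line on every failed column) with a single split followed by one loop over the column slice starting at i.
-- outside the precondition, e.g. on get_number_from_line('5 a', -1): A returns 5, B returns None
import Mathlib
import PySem

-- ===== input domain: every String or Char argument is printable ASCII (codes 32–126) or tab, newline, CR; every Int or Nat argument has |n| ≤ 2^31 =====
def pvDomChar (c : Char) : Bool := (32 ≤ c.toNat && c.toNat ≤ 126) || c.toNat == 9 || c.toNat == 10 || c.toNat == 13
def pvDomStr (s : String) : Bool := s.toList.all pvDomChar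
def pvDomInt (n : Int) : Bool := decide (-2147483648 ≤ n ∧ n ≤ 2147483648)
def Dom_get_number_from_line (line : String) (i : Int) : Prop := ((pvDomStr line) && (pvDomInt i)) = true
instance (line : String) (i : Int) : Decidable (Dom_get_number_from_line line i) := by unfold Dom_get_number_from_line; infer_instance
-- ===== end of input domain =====

-- B splits the line once and scans the column slice from i; A recurses, re-splitting on every failed column.

-- ===== PORT A =====
-- literal port of A: index column i (Python indexing), int() it, on ValueError recurse with i+1, on IndexError return None
def get_number_from_line (line : String) (i : Int) : Option Int :=
  match h : PySem.List.pyGet? (PySem.Str.split₀ line) i with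
  | none => none
  | some s =>
    match PySem.Int.ofStr? s with
    | some n => some n
    | none => get_number_from_line line (i + 1)
termination_by ((PySem.Str.split₀ line).length - i).toNat
decreasing_by
  have : PySem.Raise.InRange (PySem.Str.split₀ line).length i := by
    by_contra hn
    rw [(PySem.List.pyGet?_eq_none_iff _ _).2 hn] at h
    simp at h
  unfold PySem.Raise.InRange at this
  omega

-- ===== PORT B =====
-- helper of B's loop body: first int()-parseable element of the list
def pvFirstInt : List String → Option Int
  | [] => none
  | c :: rest =>
    match PySem.Int.ofStr? c with
    | some n => some n
    | none => pvFirstInt rest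

def get_number_from_line_alt (line : String) (i : Int) : Option Int :=
  pvFirstInt (PySem.List.slice (PySem.Str.split₀ line) (some i) none)

-- ===== PRECONDITION & SPEC =====
-- Pre_ excludes negative i, a corner outside the function's natural column-index domain: there A's
-- negative-index wraparound (and, after reaching index -1, its accidental re-scan from column 0)
-- is an artefact of Python indexing, while B uses plain slice semantics; neither behaviour is specified.
def Pre_get_number_from_line (line : String) (i : Int) : Prop := 0 ≤ i
instance (line : String) (i : Int) : Decidable (Pre_get_number_from_line line i) := by unfold Pre_get_number_from_line; infer_instance

def pvWitness_get_number_from_line : String × Int := ("abc 42", 0)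

def Spec_get_number_from_line (line : String) (i : Int) (out : Option Int) : Prop := out = get_number_from_line_alt line i
instance (line : String) (i : Int) (out : Option Int) : Decidable (Spec_get_number_from_line line i out) := by unfold Spec_get_number_from_line; infer_instance

-- ===== CLAIM (what is proved, stated in full; the proofs are below) =====
def Claim_equal_get_number_from_line : Prop := ∀ (line : String) (i : Int), Dom_get_number_from_line line i → Pre_get_number_from_line line i → Spec_get_number_from_line line i (get_number_from_line line i)

-- ===== LEMMAS AND PROOFS =====

-- A's recursion from a nonnegative index computes the first parseable element of the dropped suffix.
lemma get_number_from_line_eq_firstInt_drop (line : String) :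
    ∀ (k : Nat) (i : Int), 0 ≤ i → (PySem.Str.split₀ line).length - i.toNat = k →
      get_number_from_line line i = pvFirstInt ((PySem.Str.split₀ line).drop i.toNat) := by
  intro k
  induction k with
  | zero =>
    intro i hi hk
    rw [get_number_from_line]
    have hlen : (PySem.Str.split₀ line).length ≤ i.toNat := by omega
    rw [PySem.List.pyGet?_of_nonneg _ hi]
    rw [List.getElem?_eq_none hlen, List.drop_of_length_le hlen]
    rfl
  | succ k ih =>
    intro i hi hk
    have hlt : i.toNat < (PySem.Str.split₀ line).length := by omega
    rw [get_number_from_line]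
    rw [PySem.List.pyGet?_of_nonneg _ hi, List.getElem?_eq_getElem hlt,
        List.drop_eq_getElem_cons hlt]
    simp only [pvFirstInt]
    cases hp : PySem.Int.ofStr? (PySem.Str.split₀ line)[i.toNat] with
    | some n => rfl
    | none =>
      have h1 : (i + 1).toNat = i.toNat + 1 := by omega
      rw [ih (i + 1) (by omega) (by omega), h1]

-- ===== VERDICT (by name: the statement is the Claim_ definition above) =====
theorem get_number_from_line_spec : Claim_equal_get_number_from_line := by
  intro line i _ hpre
  unfold Spec_get_number_from_line get_number_from_line_alt
  rw [PySem.List.slice_from _ hpre]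
  exact get_number_from_line_eq_firstInt_drop line _ i hpre rfl
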